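-- pv_equiv track=rewrite | github.com/chira-ploy/algorithm-DNAseq | alignment_editDistance_approximate_matching.py | editDistance_approximate_matching
-- ===== SOURCE A (Python) =====
-- def editDistance_approximate_matching(x, y):
--     """
--     Calculate the approximate edit distance between two strings.
--
--     Parameters:
--     - x (str): The first string.
--     - y (str): The second string.
--
--     Returns:
--     - int: The minimum approximate edit distance between the two strings.
--     """
--
--     # Create distance matrix
--     D = []
--     for i in range(len(x)+1):
--         D.append([0]*(len(y)+1))
--
--     # Initialize first row and column of matrix
--     for i in range(len(x)+1):
--         D[i][0] = i
--     for i in range(len(y)+1):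
--         D[0][i] = 0
--
--     # Fill in the rest of the matrix
--     for i in range(1, len(x)+1):
--         for j in range(1, len(y)+1):
--             distHor = D[i][j-1] + 1
--             distVer = D[i-1][j] + 1
--             if x[i-1] == y[j-1]:
--                 distDiag = D[i-1][j-1]
--             else:
--                 distDiag = D[i-1][j-1] + 1
--             D[i][j] = min(distHor, distVer, distDiag)
--
--     # Edit distance is the value in the bottom right corner of the matrix
--     distance = D[-1] #last row of the matrix
--     distance.sort() #all possible alignments are stored in the last row of the matrix
--
--     return distance[0]
-- ===== SOURCE B (Python) =====
-- def editDistance_approximate_matching(x, y):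
--     """Landau-Vishkin k-differences search: for a growing edit budget d, keep
--     only the furthest-reaching row on each diagonal (greedy match slides, free
--     starts on the top row) and return the first d at which some diagonal
--     reaches the bottom row."""
--     m, n = len(x), len(y)
--
--     def slide(i, k):
--         while i < m and i + k < n and x[i] == y[i + k]:
--             i += 1
--         return i
--
--     # F[k + m] = furthest row reachable on diagonal k = j - i with <= d edits (-1 if none)
--     F = [slide(0, k) if k >= 0 else -1 for k in range(-m, n + 1)]
--     d = 0
--     while all(f < m for f in F):
--         d += 1
--         G = []
--         for k in range(-m, n + 1):
--             c = -1
--             if F[k + m] >= 0: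
--                 c = min(F[k + m] + 1, m, n - k)          # substitution (capped)
--             if k < n and F[k + 1 + m] >= 0:
--                 c = max(c, min(F[k + 1 + m] + 1, m))     # deletion from x
--             if k > -m and F[k - 1 + m] >= 0:
--                 c = max(c, min(F[k - 1 + m], n - k))     # insertion into x
--             G.append(slide(c, k) if c >= 0 else -1)
--         F = G
--     return d
-- ===== Notes on version B (the rewrite author's own statement) =====
-- stated objective: alternative
-- what changed: Replaces the full DP matrix plus last-row sort by the Landau-Vishkin k-differences search: for a growing edit budget d it keeps only the furthest-reaching row on each diagonal (greedy match slides, free starts on the top row) and returns the first d at which some diagonal reaches the bottom row.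
import Mathlib
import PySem

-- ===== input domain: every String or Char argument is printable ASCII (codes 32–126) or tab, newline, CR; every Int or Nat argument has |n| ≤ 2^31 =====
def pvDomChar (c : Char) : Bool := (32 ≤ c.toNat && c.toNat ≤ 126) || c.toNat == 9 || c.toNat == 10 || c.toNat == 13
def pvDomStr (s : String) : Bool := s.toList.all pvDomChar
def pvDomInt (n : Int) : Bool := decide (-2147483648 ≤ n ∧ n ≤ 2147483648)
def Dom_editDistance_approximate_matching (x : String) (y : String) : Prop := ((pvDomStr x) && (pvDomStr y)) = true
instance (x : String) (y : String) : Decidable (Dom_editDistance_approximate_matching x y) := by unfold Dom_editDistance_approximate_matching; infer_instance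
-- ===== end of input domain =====

-- B replaces A's full DP matrix + last-row sort by the Landau–Vishkin k-differences diagonal search (same return value).


-- ===== PORT A =====
-- literal transliteration of A: build the (m+1)×(n+1) matrix, initialize first
-- column to i and first row to 0, fill row-major, sort the last row, return its head
def editDistance_approximate_matching (x : String) (y : String) : Int :=
  let xs := x.toList
  let ys := y.toList
  -- D = []; for i in range(len(x)+1): D.append([0]*(len(y)+1))
  let D : List (List Int) :=
    (PySem.List.pyRange 0 ((xs.length : Int) + 1) 1).foldl
      (fun D _ => D ++ [List.replicate (ys.length + 1) (0 : Int)]) []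
  -- for i in range(len(x)+1): D[i][0] = i
  let D := (PySem.List.pyRange 0 ((xs.length : Int) + 1) 1).foldl
      (fun D i => PySem.List.pySetD D i (PySem.List.pySetD (PySem.List.pyGetD D i []) 0 i)) D
  -- for i in range(len(y)+1): D[0][i] = 0
  let D := (PySem.List.pyRange 0 ((ys.length : Int) + 1) 1).foldl
      (fun D i => PySem.List.pySetD D 0 (PySem.List.pySetD (PySem.List.pyGetD D 0 []) i 0)) D
  -- for i in range(1, len(x)+1): for j in range(1, len(y)+1): …
  let D := (PySem.List.pyRange 1 ((xs.length : Int) + 1) 1).foldl (fun D i =>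
      (PySem.List.pyRange 1 ((ys.length : Int) + 1) 1).foldl (fun D j =>
        let distHor := PySem.List.pyGetD (PySem.List.pyGetD D i []) (j - 1) 0 + 1
        let distVer := PySem.List.pyGetD (PySem.List.pyGetD D (i - 1) []) j 0 + 1
        let distDiag :=
          if PySem.List.pyGetD xs (i - 1) ' ' == PySem.List.pyGetD ys (j - 1) ' ' then
            PySem.List.pyGetD (PySem.List.pyGetD D (i - 1) []) (j - 1) 0
          else
            PySem.List.pyGetD (PySem.List.pyGetD D (i - 1) []) (j - 1) 0 + 1
        PySem.List.pySetD D i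
          (PySem.List.pySetD (PySem.List.pyGetD D i []) j
            (min (min distHor distVer) distDiag))) D) D
  -- distance = D[-1]; distance.sort(); return distance[0]
  let distance := PySem.List.pyGetD D (-1) []
  let distance := PySem.List.sorted distance (fun v => v) false
  PySem.List.pyGetD distance 0 0

-- ===== PORT B =====
-- literal transliteration of B (Source B): Landau–Vishkin k-differences search.
-- while-loops become fuel recursion (the fuel is a totality guard only:
-- slide advances at most len(x) times, the d-loop exits by d = len(x)).

-- slide(i, k): while i < m and i + k < n and x[i] == y[i+k]: i += 1
def edSlide (xs ys : List Char) (k : Int) : Nat → Int → Int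
  | 0, i => i
  | fuel + 1, i =>
      if i < (xs.length : Int) ∧ i + k < (ys.length : Int) ∧
         PySem.List.pyGetD xs i ' ' = PySem.List.pyGetD ys (i + k) ' ' then
        edSlide xs ys k fuel (i + 1)
      else i

-- the body of the while loop: one new list G from F (d += 1 happens in edLoop)
def edStep (xs ys : List Char) (F : List Int) : List Int :=
  let m : Int := xs.length
  let n : Int := ys.length
  (PySem.List.pyRange (-m) (n + 1) 1).map (fun k =>
    let c : Int := if 0 ≤ PySem.List.pyGetD F (k + m) 0 then
        min (min (PySem.List.pyGetD F (k + m) 0 + 1) m) (n - k) else -1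
    let c := if k < n ∧ 0 ≤ PySem.List.pyGetD F (k + 1 + m) 0 then
        max c (min (PySem.List.pyGetD F (k + 1 + m) 0 + 1) m) else c
    let c := if -m < k ∧ 0 ≤ PySem.List.pyGetD F (k - 1 + m) 0 then
        max c (min (PySem.List.pyGetD F (k - 1 + m) 0) (n - k)) else c
    if 0 ≤ c then edSlide xs ys k (xs.length + 1) c else -1)

-- while all(f < m for f in F): d += 1; F = G
def edLoop (xs ys : List Char) : Nat → List Int → Int → Int
  | 0, _, d => d
  | fuel + 1, F, d =>
      if F.all (fun f => decide (f < (xs.length : Int))) then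
        edLoop xs ys fuel (edStep xs ys F) (d + 1)
      else d

def editDistance_approximate_matching_alt (x : String) (y : String) : Int :=
  let xs := x.toList
  let ys := y.toList
  let m : Int := xs.length
  let n : Int := ys.length
  -- F = [slide(0, k) if k >= 0 else -1 for k in range(-m, n+1)]
  let F : List Int := (PySem.List.pyRange (-m) (n + 1) 1).map
      (fun k => if 0 ≤ k then edSlide xs ys k (xs.length + 1) 0 else -1)
  edLoop xs ys (xs.length + 2) F 0

-- ===== PRECONDITION & SPEC =====
def Spec_editDistance_approximate_matching (x : String) (y : String) (out : Int) : Prop := out = editDistance_approximate_matching_alt x y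
instance (x : String) (y : String) (out : Int) : Decidable (Spec_editDistance_approximate_matching x y out) := by unfold Spec_editDistance_approximate_matching; infer_instance

-- ===== CLAIM (what is proved, stated in full; the proofs are below) =====
def Claim_equal_editDistance_approximate_matching : Prop := ∀ (x : String) (y : String), Dom_editDistance_approximate_matching x y → Spec_editDistance_approximate_matching x y (editDistance_approximate_matching x y)

-- ===== LEMMAS AND PROOFS =====

def eCost (xs ys : List Char) (i j : Nat) : Int :=
  if xs.getD i ' ' == ys.getD j ' ' then 0 else 1

def eD (xs ys : List Char) : Nat → Nat → Int
  | i, 0 => (i : Int)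
  | 0, _ + 1 => 0
  | i + 1, j + 1 =>
      min (min (eD xs ys (i + 1) j + 1) (eD xs ys i (j + 1) + 1))
          (eD xs ys i j + eCost xs ys i j)
termination_by i j => (i, j)

def initRow (n k : Nat) : List Int := (k : Int) :: List.replicate n 0
def doneRow (xs ys : List Char) (k : Nat) : List Int :=
  (List.range (ys.length + 1)).map (fun j => eD xs ys k j)
def partRow (xs ys : List Char) (i j : Nat) : List Int :=
  (List.range (ys.length + 1)).map (fun t => if t ≤ j then eD xs ys i t else 0)
def matIn (xs ys : List Char) (i j : Nat) : List (List Int) :=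
  (List.range (xs.length + 1)).map (fun k =>
    if k < i then doneRow xs ys k else if k = i then partRow xs ys i j else initRow ys.length k)
def matA (xs ys : List Char) (i : Nat) : List (List Int) :=
  (List.range (xs.length + 1)).map (fun k =>
    if k ≤ i then doneRow xs ys k else initRow ys.length k)

lemma eD_zero (xs ys : List Char) (j : Nat) : eD xs ys 0 j = 0 := by
  cases j <;> simp [eD]

lemma set_map_range {α : Type} (f : Nat → α) (n k : Nat) (v : α) (_hk : k < n) :
    ((List.range n).map f).set k v = (List.range n).map (fun t => if t = k then v else f t) := by
  apply List.ext_getElem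
  · simp
  · intro i h1 h2
    simp only [List.getElem_set, List.getElem_map, List.getElem_range]
    split_ifs with h h' <;> first | rfl | omega

lemma initRow_eq (n k : Nat) :
    initRow n k = (List.range (n + 1)).map (fun t => if t = 0 then (k : Int) else 0) := by
  apply List.ext_getElem
  · simp [initRow]
  · intro i h1 h2
    simp only [List.getElem_map, List.getElem_range]
    cases i with
    | zero => simp [initRow]
    | succ t => simp [initRow, List.getElem_cons_succ]

lemma foldl_fixed {α β : Type} (step : α → β → α) (a : α) :
    ∀ l : List β, (∀ x ∈ l, step a x = a) → l.foldl step a = a := by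
  intro l
  induction l with
  | nil => intro _; rfl
  | cons h t ih =>
    intro hx
    rw [List.foldl_cons, hx h (by simp)]
    exact ih fun x hx' => hx x (by simp [hx'])

-- step 1: the build loop produces the all-zero matrix
lemma buildA (m n : Nat) :
    (PySem.List.pyRange 0 ((m : Int) + 1) 1).foldl
      (fun D _ => D ++ [List.replicate (n + 1) (0 : Int)]) []
      = List.replicate (m + 1) (List.replicate (n + 1) (0 : Int)) := by
  have h := PySem.List.foldl_append_singleton_eq_map
      (fun _ : Int => List.replicate (n + 1) (0 : Int))
      (PySem.List.pyRange 0 ((m : Int) + 1) 1) []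
  rw [h, List.map_const', PySem.List.length_pyRange_one]
  norm_num

-- step 2: the first-column initialization
lemma initA (xs ys : List Char) :
    (PySem.List.pyRange 0 ((xs.length : Int) + 1) 1).foldl
      (fun D i => PySem.List.pySetD D i (PySem.List.pySetD (PySem.List.pyGetD D i []) 0 i))
      (List.replicate (xs.length + 1) (List.replicate (ys.length + 1) (0 : Int)))
      = (List.range (xs.length + 1)).map (fun k => initRow ys.length k) := by
  have key : ∀ N ≤ xs.length + 1,
      (PySem.List.pyRange 0 ((N : Int)) 1).foldl
        (fun D i => PySem.List.pySetD D i (PySem.List.pySetD (PySem.List.pyGetD D i []) 0 i))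
        (List.replicate (xs.length + 1) (List.replicate (ys.length + 1) (0 : Int)))
        = (List.range (xs.length + 1)).map
            (fun k => if k < N then initRow ys.length k else List.replicate (ys.length + 1) 0) := by
    intro N
    induction N with
    | zero =>
      intro _
      rw [PySem.List.pyRange_one_eq_nil (by omega)]
      simp [List.map_const']
    | succ N ih =>
      intro hN
      have hcast : ((N + 1 : Nat) : Int) = (N : Int) + 1 := by push_cast; ring
      rw [hcast, PySem.List.pyRange_one_succ_right (by omega), List.foldl_append,
        ih (by omega)]
      simp only [List.foldl_cons, List.foldl_nil]
      rw [PySem.List.pyGetD_natCast, PySem.List.getD_map_range _ _ _ _ (by omega)]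
      rw [if_neg (by omega)]
      have hrow : PySem.List.pySetD (List.replicate (ys.length + 1) (0 : Int)) 0 ((N : Nat) : Int)
          = initRow ys.length N := by
        rw [PySem.List.pySetD_of_nonneg (h := by omega)]
        simp [List.replicate_succ, initRow]
      rw [hrow, PySem.List.pySetD_natCast, set_map_range _ _ _ _ (by omega)]
      apply List.map_congr_left
      intro k hk
      simp only [List.mem_range] at hk
      by_cases h1 : k = N
      · simp [h1]
      · by_cases h2 : k < N <;> simp [h1, h2] <;> omega
  have h2 := key (xs.length + 1) (le_refl _)
  have hcast : ((xs.length + 1 : Nat) : Int) = (xs.length : Int) + 1 := by push_cast; ring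
  rw [hcast] at h2
  rw [h2]
  apply List.map_congr_left
  intro k hk
  simp only [List.mem_range] at hk
  rw [if_pos (by omega)]

-- step 3: the first-row loop writes zeros over zeros and changes nothing
lemma zeroA (xs ys : List Char) :
    (PySem.List.pyRange 0 ((ys.length : Int) + 1) 1).foldl
      (fun D i => PySem.List.pySetD D 0 (PySem.List.pySetD (PySem.List.pyGetD D 0 []) i 0))
      ((List.range (xs.length + 1)).map (fun k => initRow ys.length k))
      = (List.range (xs.length + 1)).map (fun k => initRow ys.length k) := by
  apply foldl_fixed
  intro j hj
  rw [PySem.List.mem_pyRange_one] at hj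
  have hget : PySem.List.pyGetD ((List.range (xs.length + 1)).map (fun k => initRow ys.length k)) 0 []
      = List.replicate (ys.length + 1) (0 : Int) := by
    have : PySem.List.pyGetD ((List.range (xs.length + 1)).map (fun k => initRow ys.length k)) ((0 : Nat) : Int) []
        = List.replicate (ys.length + 1) (0 : Int) := by
      rw [PySem.List.pyGetD_natCast, PySem.List.getD_map_range _ _ _ _ (by omega)]
      simp [initRow, List.replicate_succ]
    simpa using this
  have hinner : PySem.List.pySetD (List.replicate (ys.length + 1) (0 : Int)) j 0
      = List.replicate (ys.length + 1) (0 : Int) := by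
    rw [PySem.List.pySetD_of_nonneg (h := hj.1), List.set_replicate_self]
  rw [hget, hinner]
  have : PySem.List.pySetD ((List.range (xs.length + 1)).map (fun k => initRow ys.length k)) ((0 : Nat) : Int)
      (List.replicate (ys.length + 1) (0 : Int))
      = (List.range (xs.length + 1)).map (fun k => initRow ys.length k) := by
    rw [PySem.List.pySetD_natCast, set_map_range _ _ _ _ (by omega)]
    apply List.map_congr_left
    intro k hk
    by_cases h : k = 0
    · subst h; simp [initRow, List.replicate_succ]
    · simp [h]
  simpa using this

lemma matA_zero (xs ys : List Char) :
    (List.range (xs.length + 1)).map (fun k => initRow ys.length k) = matA xs ys 0 := by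
  unfold matA
  apply List.map_congr_left
  intro k hk
  by_cases h : k = 0
  · subst h
    simp only [le_refl, if_pos]
    apply List.ext_getElem
    · simp [doneRow, initRow]
    · intro i h1 h2
      simp only [doneRow, List.getElem_map, List.getElem_range] at *
      rw [eD_zero]
      cases i with
      | zero => simp [initRow]
      | succ t => simp [initRow]
  · rw [if_neg (by omega)]

lemma partRow_zero (xs ys : List Char) (i : Nat) :
    partRow xs ys i 0 = initRow ys.length i := by
  rw [initRow_eq]
  apply List.map_congr_left
  intro t ht
  cases t with
  | zero => simp [eD]
  | succ u => simp

lemma matIn_zero (xs ys : List Char) (i : Nat) (hi : 1 ≤ i) :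
    matIn xs ys i 0 = matA xs ys (i - 1) := by
  unfold matIn matA
  apply List.map_congr_left
  intro k hk
  by_cases h1 : k < i
  · rw [if_pos h1, if_pos (by omega)]
  · by_cases h2 : k = i
    · rw [if_neg h1, if_pos h2, if_neg (by omega), h2, partRow_zero]
    · rw [if_neg h1, if_neg h2, if_neg (by omega)]

lemma matIn_full (xs ys : List Char) (i : Nat) :
    matIn xs ys i ys.length = matA xs ys i := by
  unfold matIn matA
  apply List.map_congr_left
  intro k hk
  by_cases h1 : k < i
  · rw [if_pos h1, if_pos (by omega)]
  · by_cases h2 : k = i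
    · rw [if_neg h1, if_pos h2, if_pos (by omega), h2]
      unfold partRow doneRow
      apply List.map_congr_left
      intro t ht
      simp only [List.mem_range] at ht
      rw [if_pos (by omega)]
    · rw [if_neg h1, if_neg h2, if_neg (by omega)]

lemma eD_succ (xs ys : List Char) (i j : Nat) (hi : 1 ≤ i) :
    eD xs ys i (j + 1)
      = min (min (eD xs ys i j + 1) (eD xs ys (i - 1) (j + 1) + 1))
            (eD xs ys (i - 1) j + eCost xs ys (i - 1) j) := by
  obtain ⟨i', rfl⟩ : ∃ i', i = i' + 1 := ⟨i - 1, by omega⟩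
  simp [eD]

lemma pyGetD_partRow (xs ys : List Char) (i j t : Nat) (ht : t ≤ j) (htn : t ≤ ys.length) :
    PySem.List.pyGetD (partRow xs ys i j) ((t : Nat) : Int) 0 = eD xs ys i t := by
  rw [PySem.List.pyGetD_natCast]
  unfold partRow
  rw [PySem.List.getD_map_range _ _ _ _ (by omega), if_pos ht]

lemma pyGetD_doneRow (xs ys : List Char) (k t : Nat) (htn : t ≤ ys.length) :
    PySem.List.pyGetD (doneRow xs ys k) ((t : Nat) : Int) 0 = eD xs ys k t := by
  rw [PySem.List.pyGetD_natCast]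
  unfold doneRow
  rw [PySem.List.getD_map_range _ _ _ _ (by omega)]

lemma pyGetD_matIn_self (xs ys : List Char) (i j : Nat) (hi : i ≤ xs.length) :
    PySem.List.pyGetD (matIn xs ys i j) ((i : Nat) : Int) [] = partRow xs ys i j := by
  rw [PySem.List.pyGetD_natCast]
  unfold matIn
  rw [PySem.List.getD_map_range _ _ _ _ (by omega), if_neg (by omega), if_pos rfl]

lemma pyGetD_matIn_prev (xs ys : List Char) (i j : Nat) (hi1 : 1 ≤ i) (hi : i ≤ xs.length) :
    PySem.List.pyGetD (matIn xs ys i j) ((i : Int) - 1) [] = doneRow xs ys (i - 1) := by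
  rw [show ((i : Int) - 1) = (((i - 1 : Nat) : Nat) : Int) by omega]
  rw [PySem.List.pyGetD_natCast]
  unfold matIn
  rw [PySem.List.getD_map_range _ _ _ _ (by omega), if_pos (by omega)]

lemma stepA_set (xs ys : List Char) (i j : Nat) (hi : i ≤ xs.length) (hj : j + 1 ≤ ys.length) :
    PySem.List.pySetD (matIn xs ys i j) ((i : Nat) : Int)
      (PySem.List.pySetD (partRow xs ys i j) (((j + 1 : Nat)) : Int) (eD xs ys i (j + 1)))
      = matIn xs ys i (j + 1) := by
  have hrow : PySem.List.pySetD (partRow xs ys i j) (((j + 1 : Nat)) : Int) (eD xs ys i (j + 1))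
      = partRow xs ys i (j + 1) := by
    rw [PySem.List.pySetD_natCast]
    unfold partRow
    rw [set_map_range _ _ _ _ (by omega)]
    apply List.map_congr_left
    intro t ht
    by_cases h1 : t = j + 1
    · subst h1; simp
    · by_cases h2 : t ≤ j
      · rw [if_neg h1, if_pos h2, if_pos (by omega)]
      · rw [if_neg h1, if_neg h2, if_neg (by omega)]
  rw [hrow, PySem.List.pySetD_natCast]
  unfold matIn
  rw [set_map_range _ _ _ _ (by omega)]
  apply List.map_congr_left
  intro k hk
  by_cases h1 : k = i
  · subst h1; simp
  · by_cases h2 : k < i <;> simp [h1, h2]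

lemma rowFill (xs ys : List Char) (i : Nat) (hi1 : 1 ≤ i) (hi : i ≤ xs.length) :
    ∀ j, j ≤ ys.length →
    (PySem.List.pyRange 1 ((j : Int) + 1) 1).foldl
      (fun D jj =>
        let distHor := PySem.List.pyGetD (PySem.List.pyGetD D ((i : Nat) : Int) []) (jj - 1) 0 + 1
        let distVer := PySem.List.pyGetD (PySem.List.pyGetD D (((i : Nat) : Int) - 1) []) jj 0 + 1
        let distDiag :=
          if PySem.List.pyGetD xs (((i : Nat) : Int) - 1) ' ' == PySem.List.pyGetD ys (jj - 1) ' ' then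
            PySem.List.pyGetD (PySem.List.pyGetD D (((i : Nat) : Int) - 1) []) (jj - 1) 0
          else
            PySem.List.pyGetD (PySem.List.pyGetD D (((i : Nat) : Int) - 1) []) (jj - 1) 0 + 1
        PySem.List.pySetD D ((i : Nat) : Int)
          (PySem.List.pySetD (PySem.List.pyGetD D ((i : Nat) : Int) []) jj
            (min (min distHor distVer) distDiag)))
      (matIn xs ys i 0) = matIn xs ys i j := by
  intro j
  induction j with
  | zero =>
    intro _
    rw [PySem.List.pyRange_one_eq_nil (by omega)]
    rfl
  | succ j ih =>
    intro hj
    have hcast : ((j + 1 : Nat) : Int) + 1 = ((j : Int) + 1) + 1 := by push_cast; ring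
    rw [hcast, PySem.List.pyRange_one_succ_right (by omega), List.foldl_append, ih (by omega)]
    simp only [List.foldl_cons, List.foldl_nil]
    have hjj : ((j : Int) + 1) = ((j + 1 : Nat) : Int) := by push_cast; ring
    rw [hjj]
    have hsub : (((j + 1 : Nat) : Int) - 1) = ((j : Nat) : Int) := by push_cast; ring
    rw [hsub, pyGetD_matIn_self xs ys i j hi, pyGetD_matIn_prev xs ys i j hi1 hi,
      pyGetD_partRow xs ys i j j (le_refl _) (by omega),
      pyGetD_doneRow xs ys (i - 1) (j + 1) (by omega),
      pyGetD_doneRow xs ys (i - 1) j (by omega)]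
    have hxc : PySem.List.pyGetD xs (((i : Nat) : Int) - 1) ' ' = xs.getD (i - 1) ' ' := by
      rw [show (((i : Nat) : Int) - 1) = (((i - 1 : Nat) : Nat) : Int) by omega,
        PySem.List.pyGetD_natCast]
    have hyc : PySem.List.pyGetD ys ((j : Nat) : Int) ' ' = ys.getD j ' ' := by
      rw [PySem.List.pyGetD_natCast]
    rw [hxc, hyc]
    have hval : min (min (eD xs ys i j + 1) (eD xs ys (i - 1) (j + 1) + 1))
        (if xs.getD (i - 1) ' ' == ys.getD j ' ' then eD xs ys (i - 1) j
         else eD xs ys (i - 1) j + 1) = eD xs ys i (j + 1) := by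
      rw [eD_succ xs ys i j hi1]
      unfold eCost
      split_ifs <;> ring_nf
    rw [hval, stepA_set xs ys i j hi (by omega)]

lemma outerA (xs ys : List Char) :
    ∀ i, i ≤ xs.length →
    (PySem.List.pyRange 1 ((i : Int) + 1) 1).foldl
      (fun D ii =>
        (PySem.List.pyRange 1 ((ys.length : Int) + 1) 1).foldl
          (fun D jj =>
            let distHor := PySem.List.pyGetD (PySem.List.pyGetD D ii []) (jj - 1) 0 + 1
            let distVer := PySem.List.pyGetD (PySem.List.pyGetD D (ii - 1) []) jj 0 + 1
            let distDiag :=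
              if PySem.List.pyGetD xs (ii - 1) ' ' == PySem.List.pyGetD ys (jj - 1) ' ' then
                PySem.List.pyGetD (PySem.List.pyGetD D (ii - 1) []) (jj - 1) 0
              else
                PySem.List.pyGetD (PySem.List.pyGetD D (ii - 1) []) (jj - 1) 0 + 1
            PySem.List.pySetD D ii
              (PySem.List.pySetD (PySem.List.pyGetD D ii []) jj
                (min (min distHor distVer) distDiag))) D)
      (matA xs ys 0) = matA xs ys i := by
  intro i
  induction i with
  | zero =>
    intro _
    rw [PySem.List.pyRange_one_eq_nil (a := 1) (b := ((0 : Nat) : Int) + 1) (by omega)]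
    rfl
  | succ i ih =>
    intro hi
    have hcast : ((i + 1 : Nat) : Int) + 1 = ((i : Int) + 1) + 1 := by push_cast; ring
    rw [hcast, PySem.List.pyRange_one_succ_right (a := 1) (b := (i : Int) + 1) (by omega),
      List.foldl_append, ih (by omega)]
    simp only [List.foldl_cons, List.foldl_nil]
    have hii : ((i : Int) + 1) = ((i + 1 : Nat) : Int) := by push_cast; ring
    rw [hii]
    have hstart : matA xs ys i = matIn xs ys (i + 1) 0 := by
      rw [matIn_zero xs ys (i + 1) (by omega), Nat.add_sub_cancel]
    rw [hstart, rowFill xs ys (i + 1) (by omega) (by omega) ys.length (le_refl _),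
      matIn_full]

lemma lastRowA (xs ys : List Char) :
    PySem.List.pyGetD (matA xs ys xs.length) (-1) [] = doneRow xs ys xs.length := by
  have hlen : (matA xs ys xs.length).length = xs.length + 1 := by simp [matA]
  rw [PySem.List.pyGetD_neg_ofNat _ 1 _ (by omega) (by omega)]
  simp [matA]

lemma pv_min_mem {a : Int} {l : List Int} (ha : a ∈ l) (hle : ∀ y ∈ l, a ≤ y)
    {b : Int} (hb : b ∈ l) (hble : ∀ y ∈ l, b ≤ y) : a = b :=
  le_antisymm (hle b hb) (hble a ha)

-- ======================= B-side theory (Landau–Vishkin) =======================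

lemma eD_succ' (xs ys : List Char) (i j : Nat) :
    eD xs ys (i + 1) (j + 1)
      = min (min (eD xs ys i (j + 1) + 1) (eD xs ys (i + 1) j + 1))
            (eD xs ys i j + eCost xs ys i j) := by
  rw [min_comm (eD xs ys i (j + 1) + 1) (eD xs ys (i + 1) j + 1)]
  simp [eD]

lemma eD_i_zero (xs ys : List Char) (i : Nat) : eD xs ys i 0 = (i : Int) := by
  cases i <;> simp [eD]

lemma eCost_bounds (xs ys : List Char) (i j : Nat) :
    0 ≤ eCost xs ys i j ∧ eCost xs ys i j ≤ 1 := by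
  unfold eCost; split <;> omega

-- 0 ≤ eD and i - j ≤ eD, simultaneously by strong induction on i + j
lemma eD_lb (xs ys : List Char) : ∀ s i j, i + j ≤ s →
    0 ≤ eD xs ys i j ∧ (i : Int) - (j : Int) ≤ eD xs ys i j := by
  intro s
  induction s with
  | zero =>
    intro i j h
    obtain ⟨rfl, rfl⟩ : i = 0 ∧ j = 0 := by omega
    simp [eD]
  | succ s ih =>
    intro i j h
    cases j with
    | zero => rw [eD_i_zero]; constructor <;> [positivity; omega]
    | succ j =>
      cases i with
      | zero => rw [eD_zero]; constructor <;> omega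
      | succ i =>
        rw [eD_succ']
        have h1 := ih i (j + 1) (by omega)
        have h2 := ih (i + 1) j (by omega)
        have h3 := ih i j (by omega)
        have hc := eCost_bounds xs ys i j
        push_cast
        push_cast at h1 h2 h3
        omega

lemma eD_nonneg (xs ys : List Char) (i j : Nat) : 0 ≤ eD xs ys i j :=
  (eD_lb xs ys (i + j) i j le_rfl).1

lemma eD_ge_sub (xs ys : List Char) (i j : Nat) : (i : Int) - (j : Int) ≤ eD xs ys i j :=
  (eD_lb xs ys (i + j) i j le_rfl).2

lemma eD_fwdH (xs ys : List Char) (i j : Nat) : eD xs ys i (j + 1) ≤ eD xs ys i j + 1 := by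
  cases i with
  | zero => rw [eD_zero, eD_zero]; omega
  | succ i => rw [eD_succ' xs ys i j]; omega

lemma eD_fwdV (xs ys : List Char) (i j : Nat) : eD xs ys (i + 1) j ≤ eD xs ys i j + 1 := by
  cases j with
  | zero => rw [eD_i_zero, eD_i_zero]; push_cast; omega
  | succ j => rw [eD_succ' xs ys i j]; omega

lemma eD_diagLe (xs ys : List Char) (i j : Nat) :
    eD xs ys (i + 1) (j + 1) ≤ eD xs ys i j + 1 := by
  rw [eD_succ']
  have hc := eCost_bounds xs ys i j
  omega

lemma eD_revV (xs ys : List Char) (i : Nat) : ∀ j, eD xs ys i j ≤ eD xs ys (i + 1) j + 1 := by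
  intro j
  induction j with
  | zero => rw [eD_i_zero, eD_i_zero]; push_cast; omega
  | succ j ih =>
    rw [eD_succ' xs ys i j]
    have h1 := eD_fwdH xs ys i j
    have hc := eCost_bounds xs ys i j
    omega

lemma eD_revH (xs ys : List Char) (j : Nat) : ∀ i, eD xs ys i j ≤ eD xs ys i (j + 1) + 1 := by
  intro i
  induction i generalizing j with
  | zero => rw [eD_zero, eD_zero]; omega
  | succ i ih =>
    rw [eD_succ' xs ys i j]
    have h1 := eD_fwdV xs ys i j
    have h2 := ih j
    have hc := eCost_bounds xs ys i j
    omega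

lemma eD_diagMono (xs ys : List Char) (i j : Nat) : eD xs ys i j ≤ eD xs ys (i + 1) (j + 1) := by
  rw [eD_succ']
  have h1 := eD_revV xs ys i j
  have h2 := eD_revH xs ys j i
  have hc := eCost_bounds xs ys i j
  omega

lemma eD_matchEq (xs ys : List Char) (i j : Nat) (h : xs.getD i ' ' = ys.getD j ' ') :
    eD xs ys (i + 1) (j + 1) = eD xs ys i j := by
  have hc : eCost xs ys i j = 0 := by unfold eCost; rw [h]; simp
  apply le_antisymm
  · rw [eD_succ', hc]; omega
  · exact eD_diagMono xs ys i j

-- the precise "admissible point on diagonal k with budget d" predicate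
def okN (xs ys : List Char) (d k : Int) (i : Nat) : Prop :=
  -k ≤ (i : Int) ∧ (i : Int) ≤ (xs.length : Int) ∧ (i : Int) + k ≤ (ys.length : Int) ∧
    eD xs ys i ((i : Int) + k).toNat ≤ d

def okB (xs ys : List Char) (d k : Int) (i : Nat) : Bool :=
  decide (-k ≤ (i : Int)) && decide ((i : Int) ≤ (xs.length : Int)) &&
  decide ((i : Int) + k ≤ (ys.length : Int)) && decide (eD xs ys i ((i : Int) + k).toNat ≤ d)

lemma okB_iff (xs ys : List Char) (d k : Int) (i : Nat) :
    okB xs ys d k i = true ↔ okN xs ys d k i := by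
  simp [okB, okN, and_assoc]

lemma okN_mono (xs ys : List Char) {d d' k : Int} {i : Nat} (h : d ≤ d')
    (hok : okN xs ys d k i) : okN xs ys d' k i :=
  ⟨hok.1, hok.2.1, hok.2.2.1, le_trans hok.2.2.2 h⟩

-- greatest admissible row, scanned downward
def HHgo (P : Nat → Bool) : Nat → Int
  | 0 => if P 0 then 0 else -1
  | c + 1 => if P (c + 1) then ((c + 1 : Nat) : Int) else HHgo P c

lemma HHgo_le_cap (P : Nat → Bool) : ∀ c, HHgo P c ≤ (c : Int) := by
  intro c
  induction c with
  | zero => simp only [HHgo]; split <;> omega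
  | succ c ih => simp only [HHgo]; split; · omega
                 · push_cast; omega

lemma HHgo_neg_or (P : Nat → Bool) : ∀ c, HHgo P c = -1 ∨ 0 ≤ HHgo P c := by
  intro c
  induction c with
  | zero => simp only [HHgo]; split <;> omega
  | succ c ih => simp only [HHgo]; split; · right; positivity
                 · exact ih

lemma HHgo_le (P : Nat → Bool) : ∀ c i, P i = true → i ≤ c → (i : Int) ≤ HHgo P c := by
  intro c
  induction c with
  | zero =>
    intro i hP hic
    obtain rfl : i = 0 := by omega
    simp only [HHgo, hP, if_pos]; omega
  | succ c ih =>
    intro i hP hic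
    by_cases h : i = c + 1
    · subst h; simp [HHgo, hP]
    · simp only [HHgo]; split
      · push_cast; omega
      · exact ih i hP (by omega)

lemma HHgo_mem (P : Nat → Bool) : ∀ c, 0 ≤ HHgo P c → ∃ i : Nat, (i : Int) = HHgo P c ∧ P i = true := by
  intro c
  induction c with
  | zero =>
    intro h
    simp only [HHgo] at h ⊢
    split at h
    · exact ⟨0, by simp_all⟩
    · omega
  | succ c ih =>
    intro h
    simp only [HHgo] at h ⊢
    split at h
    · exact ⟨c + 1, by simp_all⟩
    · obtain ⟨i, h1, h2⟩ := ih h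
      exact ⟨i, by simp_all⟩

def HH (xs ys : List Char) (d k : Int) : Int := HHgo (okB xs ys d k) xs.length

lemma HH_le (xs ys : List Char) {d k : Int} {i : Nat} (h : okN xs ys d k i) :
    (i : Int) ≤ HH xs ys d k := by
  apply HHgo_le _ _ _ ((okB_iff xs ys d k i).mpr h)
  exact_mod_cast h.2.1

lemma HH_mem (xs ys : List Char) {d k : Int} (h : 0 ≤ HH xs ys d k) :
    ∃ i : Nat, (i : Int) = HH xs ys d k ∧ okN xs ys d k i := by
  obtain ⟨i, h1, h2⟩ := HHgo_mem _ _ h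
  exact ⟨i, h1, (okB_iff xs ys d k i).mp h2⟩

lemma HH_le_cap (xs ys : List Char) (d k : Int) : HH xs ys d k ≤ (xs.length : Int) :=
  HHgo_le_cap _ _

lemma HH_neg_or (xs ys : List Char) (d k : Int) : HH xs ys d k = -1 ∨ 0 ≤ HH xs ys d k :=
  HHgo_neg_or _ _

-- ---- slide lemmas ----

lemma edSlide_ge (xs ys : List Char) (k : Int) : ∀ fuel i, i ≤ edSlide xs ys k fuel i := by
  intro fuel
  induction fuel with
  | zero => intro i; simp [edSlide]
  | succ fuel ih =>
    intro i
    simp only [edSlide]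
    split
    · exact le_trans (by omega) (ih (i + 1))
    · exact le_refl i

lemma edSlide_ok (xs ys : List Char) (d k : Int) :
    ∀ fuel (i : Int), 0 ≤ i → okN xs ys d k i.toNat →
      0 ≤ edSlide xs ys k fuel i ∧ okN xs ys d k (edSlide xs ys k fuel i).toNat := by
  intro fuel
  induction fuel with
  | zero => intro i h0 hok; exact ⟨h0, hok⟩
  | succ fuel ih =>
    intro i h0 hok
    simp only [edSlide]
    split
    · rename_i hg
      obtain ⟨hg1, hg2, hg3⟩ := hg
      obtain ⟨o1, o2, o3, o4⟩ := hok
      apply ih (i + 1) (by omega)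
      have hchars : xs.getD i.toNat ' ' = ys.getD ((i.toNat : Int) + k).toNat ' ' := by
        have e1 : PySem.List.pyGetD xs i ' ' = xs.getD i.toNat ' ' := by
          conv_lhs => rw [show i = ((i.toNat : Nat) : Int) by omega]
          rw [PySem.List.pyGetD_natCast]
        have e2 : PySem.List.pyGetD ys (i + k) ' ' = ys.getD ((i.toNat : Int) + k).toNat ' ' := by
          conv_lhs => rw [show i + k = ((((i.toNat : Int) + k).toNat : Nat) : Int) by omega]
          rw [PySem.List.pyGetD_natCast]
        rw [← e1, ← e2]; exact hg3
      refine ⟨by omega, by omega, by omega, ?_⟩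
      rw [show (i + 1).toNat = i.toNat + 1 by omega,
        show (((i.toNat + 1 : Nat) : Int) + k).toNat = ((i.toNat : Int) + k).toNat + 1 by omega,
        eD_matchEq xs ys i.toNat ((i.toNat : Int) + k).toNat hchars]
      exact o4
    · exact ⟨h0, hok⟩

lemma edSlide_stopped (xs ys : List Char) (k : Int) :
    ∀ (fuel : Nat) (i : Int), (xs.length : Int) < (fuel : Int) + i →
      ¬ (edSlide xs ys k fuel i < (xs.length : Int) ∧
         edSlide xs ys k fuel i + k < (ys.length : Int) ∧
         PySem.List.pyGetD xs (edSlide xs ys k fuel i) ' '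
           = PySem.List.pyGetD ys (edSlide xs ys k fuel i + k) ' ') := by
  intro fuel
  induction fuel with
  | zero =>
    intro i h hcontra
    simp only [edSlide] at hcontra
    omega
  | succ fuel ih =>
    intro i h
    simp only [edSlide]
    split
    · exact ih (i + 1) (by push_cast at h ⊢; omega)
    · rename_i hg; exact hg

-- ---- the candidate of one step, phrased over HH ----

def cand (xs ys : List Char) (d k : Int) : Int :=
  let m : Int := xs.length
  let n : Int := ys.length
  let c : Int := if 0 ≤ HH xs ys d k then
      min (min (HH xs ys d k + 1) m) (n - k) else -1
  let c := if k < n ∧ 0 ≤ HH xs ys d (k + 1) then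
      max c (min (HH xs ys d (k + 1) + 1) m) else c
  if -m < k ∧ 0 ≤ HH xs ys d (k - 1) then
      max c (min (HH xs ys d (k - 1)) (n - k)) else c

def candFlat (xs ys : List Char) (d k : Int) : Int :=
  max (max
    (if 0 ≤ HH xs ys d k then
      min (min (HH xs ys d k + 1) (xs.length : Int)) ((ys.length : Int) - k) else -1)
    (if k < (ys.length : Int) ∧ 0 ≤ HH xs ys d (k + 1) then
      min (HH xs ys d (k + 1) + 1) (xs.length : Int) else -1))
    (if -(xs.length : Int) < k ∧ 0 ≤ HH xs ys d (k - 1) then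
      min (HH xs ys d (k - 1)) ((ys.length : Int) - k) else -1)

lemma cand_eq_flat (xs ys : List Char) (d k : Int) (hk2 : k ≤ (ys.length : Int)) :
    cand xs ys d k = candFlat xs ys d k := by
  simp only [cand, candFlat]
  split_ifs <;> omega

lemma cand_ge1 (xs ys : List Char) (d k : Int) (hk2 : k ≤ (ys.length : Int))
    (h : 0 ≤ HH xs ys d k) :
    min (min (HH xs ys d k + 1) (xs.length : Int)) ((ys.length : Int) - k) ≤ cand xs ys d k := by
  rw [cand_eq_flat xs ys d k hk2]
  simp only [candFlat]
  rw [if_pos h]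
  omega

lemma cand_ge2 (xs ys : List Char) (d k : Int) (hk2 : k ≤ (ys.length : Int))
    (h1 : k < (ys.length : Int)) (h2 : 0 ≤ HH xs ys d (k + 1)) :
    min (HH xs ys d (k + 1) + 1) (xs.length : Int) ≤ cand xs ys d k := by
  rw [cand_eq_flat xs ys d k hk2]
  simp only [candFlat]
  rw [if_pos (⟨h1, h2⟩ : k < (ys.length : Int) ∧ 0 ≤ HH xs ys d (k + 1))]
  omega

lemma cand_ge3 (xs ys : List Char) (d k : Int) (hk2 : k ≤ (ys.length : Int))
    (h1 : -(xs.length : Int) < k) (h2 : 0 ≤ HH xs ys d (k - 1)) :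
    min (HH xs ys d (k - 1)) ((ys.length : Int) - k) ≤ cand xs ys d k := by
  rw [cand_eq_flat xs ys d k hk2]
  simp only [candFlat]
  rw [if_pos (⟨h1, h2⟩ : -(xs.length : Int) < k ∧ 0 ≤ HH xs ys d (k - 1))]
  omega

def okV (xs ys : List Char) (d k v : Int) : Prop := 0 ≤ v ∧ okN xs ys d k v.toNat

lemma okVor_max (xs ys : List Char) {d k a b : Int}
    (ha : a = -1 ∨ okV xs ys d k a) (hb : b = -1 ∨ okV xs ys d k b) :
    max a b = -1 ∨ okV xs ys d k (max a b) := by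
  rcases ha with ha | ha <;> rcases hb with hb | hb
  · left; omega
  · right; have h0 := hb.1; rw [show max a b = b by omega]; exact hb
  · right; have h0 := ha.1; rw [show max a b = a by omega]; exact ha
  · right
    rcases max_choice a b with h | h <;> rw [h] <;> assumption

lemma okT1 (xs ys : List Char) (d k : Int) (h : 0 ≤ HH xs ys d k) :
    okV xs ys (d + 1) k (min (min (HH xs ys d k + 1) (xs.length : Int)) ((ys.length : Int) - k)) := by
  obtain ⟨i, hih, hok⟩ := HH_mem xs ys h
  obtain ⟨o1, o2, o3, o4⟩ := hok
  rw [← hih]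
  by_cases hlt : (i : Int) < min (xs.length : Int) ((ys.length : Int) - k)
  · have hval : min (min ((i : Int) + 1) (xs.length : Int)) ((ys.length : Int) - k) = (i : Int) + 1 := by
      omega
    rw [hval]
    refine ⟨by omega, by omega, by omega, by omega, ?_⟩
    have hstep := eD_diagLe xs ys i ((i : Int) + k).toNat
    have hidx : (((((i : Int) + 1).toNat : Nat) : Int) + k).toNat = ((i : Int) + k).toNat + 1 := by
      omega
    rw [show ((i : Int) + 1).toNat = i + 1 by omega] at hidx ⊢
    rw [hidx]
    omega
  · have hval : min (min ((i : Int) + 1) (xs.length : Int)) ((ys.length : Int) - k) = (i : Int) := by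
      omega
    rw [hval]
    exact ⟨by omega, by simpa using okN_mono xs ys (by omega) ⟨o1, o2, o3, o4⟩⟩

lemma okT2 (xs ys : List Char) (d k : Int) (hk1 : -(xs.length : Int) ≤ k)
    (h : 0 ≤ HH xs ys d (k + 1)) :
    okV xs ys (d + 1) k (min (HH xs ys d (k + 1) + 1) (xs.length : Int)) := by
  obtain ⟨i, hih, hok⟩ := HH_mem xs ys h
  obtain ⟨o1, o2, o3, o4⟩ := hok
  rw [← hih]
  by_cases hlt : (i : Int) < (xs.length : Int)
  · have hval : min ((i : Int) + 1) (xs.length : Int) = (i : Int) + 1 := by omega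
    rw [hval]
    refine ⟨by omega, by omega, by omega, by omega, ?_⟩
    have hstep := eD_fwdV xs ys i ((i : Int) + (k + 1)).toNat
    have hidx : (((((i : Int) + 1).toNat : Nat) : Int) + k).toNat = ((i : Int) + (k + 1)).toNat := by
      omega
    rw [show ((i : Int) + 1).toNat = i + 1 by omega] at hidx ⊢
    rw [hidx]
    omega
  · have him' : i = xs.length := by omega
    subst him'
    have hval : min ((xs.length : Int) + 1) (xs.length : Int) = (xs.length : Int) := by omega
    rw [hval]
    refine ⟨by omega, by omega, by omega, by omega, ?_⟩
    rw [show (((xs.length : Int)).toNat : Nat) = xs.length by omega]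
    have hstep := eD_revH xs ys (((xs.length : Int) + k).toNat) xs.length
    have hidx : ((xs.length : Int) + k).toNat + 1 = ((xs.length : Int) + (k + 1)).toNat := by
      omega
    rw [hidx] at hstep
    have ho4 : eD xs ys xs.length ((xs.length : Int) + (k + 1)).toNat ≤ d := by
      have hcast : (((xs.length : Nat) : Int) + (k + 1)).toNat
          = ((xs.length : Int) + (k + 1)).toNat := by omega
      rw [← hcast]; exact o4
    omega

lemma okT3 (xs ys : List Char) (d k : Int) (hk2 : k ≤ (ys.length : Int))
    (h : 0 ≤ HH xs ys d (k - 1)) :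
    okV xs ys (d + 1) k (min (HH xs ys d (k - 1)) ((ys.length : Int) - k)) := by
  obtain ⟨i, hih, hok⟩ := HH_mem xs ys h
  obtain ⟨o1, o2, o3, o4⟩ := hok
  rw [← hih]
  by_cases hle : (i : Int) ≤ (ys.length : Int) - k
  · have hval : min ((i : Int)) ((ys.length : Int) - k) = (i : Int) := by omega
    rw [hval]
    refine ⟨by omega, by omega, by omega, by omega, ?_⟩
    have hj0 : 0 ≤ (i : Int) + (k - 1) := by omega
    have hstep := eD_fwdH xs ys i (((i : Int) + (k - 1)).toNat)
    have hidx : ((i : Int) + (k - 1)).toNat + 1 = (((i : Nat) : Int) + k).toNat := by omega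
    rw [hidx] at hstep
    rw [show ((i : Int).toNat : Nat) = i by omega]
    omega
  · have hi' : (i : Int) = (ys.length : Int) - k + 1 := by omega
    have hval : min ((i : Int)) ((ys.length : Int) - k) = (ys.length : Int) - k := by omega
    rw [hval]
    have hnk0 : 0 ≤ (ys.length : Int) - k := by omega
    refine ⟨by omega, by omega, by omega, by omega, ?_⟩
    have hstep := eD_revV xs ys (((ys.length : Int) - k).toNat) ys.length
    have hidx : (((((ys.length : Int) - k).toNat : Nat) : Int) + k).toNat = ys.length := by omega
    rw [hidx]
    have hio : ((ys.length : Int) - k).toNat + 1 = i := by omega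
    rw [hio] at hstep
    have ho4' : eD xs ys i ys.length ≤ d := by
      have : (((i : Nat) : Int) + (k - 1)).toNat = ys.length := by omega
      rw [this] at o4; exact o4
    omega

lemma cand_sound (xs ys : List Char) (d k : Int) (hk1 : -(xs.length : Int) ≤ k)
    (hk2 : k ≤ (ys.length : Int)) (hc : 0 ≤ cand xs ys d k) :
    okN xs ys (d + 1) k (cand xs ys d k).toNat := by
  rw [cand_eq_flat xs ys d k hk2] at hc ⊢
  have b1 : (if 0 ≤ HH xs ys d k then
      min (min (HH xs ys d k + 1) (xs.length : Int)) ((ys.length : Int) - k) else -1) = -1 ∨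
      okV xs ys (d + 1) k (if 0 ≤ HH xs ys d k then
      min (min (HH xs ys d k + 1) (xs.length : Int)) ((ys.length : Int) - k) else -1) := by
    split_ifs with h
    · exact Or.inr (okT1 xs ys d k h)
    · exact Or.inl rfl
  have b2 : (if k < (ys.length : Int) ∧ 0 ≤ HH xs ys d (k + 1) then
      min (HH xs ys d (k + 1) + 1) (xs.length : Int) else -1) = -1 ∨
      okV xs ys (d + 1) k (if k < (ys.length : Int) ∧ 0 ≤ HH xs ys d (k + 1) then
      min (HH xs ys d (k + 1) + 1) (xs.length : Int) else -1) := by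
    split_ifs with h
    · exact Or.inr (okT2 xs ys d k hk1 h.2)
    · exact Or.inl rfl
  have b3 : (if -(xs.length : Int) < k ∧ 0 ≤ HH xs ys d (k - 1) then
      min (HH xs ys d (k - 1)) ((ys.length : Int) - k) else -1) = -1 ∨
      okV xs ys (d + 1) k (if -(xs.length : Int) < k ∧ 0 ≤ HH xs ys d (k - 1) then
      min (HH xs ys d (k - 1)) ((ys.length : Int) - k) else -1) := by
    split_ifs with h
    · exact Or.inr (okT3 xs ys d k hk2 h.2)
    · exact Or.inl rfl
  rcases okVor_max xs ys (okVor_max xs ys b1 b2) b3 with h | h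
  · exfalso; simp only [candFlat] at *; omega
  · exact h.2

lemma cand_complete (xs ys : List Char) (d k : Int) (hd : 0 ≤ d)
    (hk1 : -(xs.length : Int) ≤ k) (hk2 : k ≤ (ys.length : Int)) :
    ∀ i : Nat, okN xs ys (d + 1) k i →
      0 ≤ cand xs ys d k ∧
      (i : Int) ≤ edSlide xs ys k (xs.length + 1) (cand xs ys d k) := by
  intro i
  induction i using Nat.strong_induction_on with
  | _ i IH =>
    intro hok
    obtain ⟨o1, o2, o3, o4⟩ := hok
    by_cases hi0 : i = 0
    · -- top row: k ≥ 0 and HH d k ≥ 0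
      subst hi0
      have hk0 : 0 ≤ k := by omega
      have hok0 : okN xs ys d k 0 := by
        refine ⟨by omega, by omega, by omega, ?_⟩
        simpa [eD_zero] using hd
      have hHH : (0 : Int) ≤ HH xs ys d k := by simpa using HH_le xs ys hok0
      have hge := cand_ge1 xs ys d k hk2 hHH
      have hc : 0 ≤ cand xs ys d k := by omega
      exact ⟨hc, le_trans hc (edSlide_ge xs ys k _ _)⟩
    · have hi1 : 1 ≤ i := by omega
      by_cases hj0 : (i : Int) + k = 0
      · -- left column: deletion chain from diagonal k+1
        have hok' : okN xs ys d (k + 1) (i - 1) := by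
          refine ⟨by omega, by omega, by omega, ?_⟩
          have hidx : (((i - 1 : Nat) : Int) + (k + 1)).toNat = 0 := by omega
          rw [hidx, eD_i_zero]
          have : eD xs ys i ((i : Int) + k).toNat ≤ d + 1 := o4
          rw [show ((i : Int) + k).toNat = 0 by omega, eD_i_zero] at this
          omega
        have hHH := HH_le xs ys hok'
        have hHH0 : (0 : Int) ≤ HH xs ys d (k + 1) := by omega
        have hkn : k < (ys.length : Int) := by omega
        have hge := cand_ge2 xs ys d k hk2 hkn hHH0
        have hc : 0 ≤ cand xs ys d k := by omega
        refine ⟨hc, le_trans ?_ (edSlide_ge xs ys k _ _)⟩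
        omega
      · -- interior: i ≥ 1 and j ≥ 1
        obtain ⟨i', rfl⟩ : ∃ i', i = i' + 1 := ⟨i - 1, by omega⟩
        have hjpos : 1 ≤ ((i' + 1 : Nat) : Int) + k := by omega
        set j : Nat := (((i' + 1 : Nat) : Int) + k).toNat with hjdef
        have hj1 : 1 ≤ j := by omega
        obtain ⟨j', hj'⟩ : ∃ j', j = j' + 1 := ⟨j - 1, by omega⟩
        have hrec : eD xs ys (i' + 1) (j' + 1) ≤ d + 1 := by rw [← hj']; exact o4
        have hj'c : ((j' : Nat) : Int) = (i' : Int) + k := by omega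
        by_cases hm : xs.getD i' ' ' = ys.getD j' ' '
        · -- match: push through the slide's maximality
          have heq := eD_matchEq xs ys i' j' hm
          have hok' : okN xs ys (d + 1) k i' := by
            refine ⟨by omega, by omega, by omega, ?_⟩
            rw [show (((i' : Nat) : Int) + k).toNat = j' by omega]
            omega
          obtain ⟨hc, hle⟩ := IH i' (by omega) hok'
          set s := edSlide xs ys k (xs.length + 1) (cand xs ys d k) with hsdef
          by_cases hlt : (i' : Int) < s
          · exact ⟨hc, by omega⟩
          · have hseq : s = (i' : Int) := by omega
            exfalso
            apply edSlide_stopped xs ys k (xs.length + 1) (cand xs ys d k) (by push_cast; omega)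
            rw [← hsdef, hseq]
            refine ⟨by omega, by omega, ?_⟩
            rw [show (((i' : Nat) : Int) + k) = (((j' : Nat) : Nat) : Int) by omega,
              PySem.List.pyGetD_natCast, PySem.List.pyGetD_natCast]
            exact hm
        · -- mismatch: one of the three predecessors fits budget d
          have hcost : eCost xs ys i' j' = 1 := by
            unfold eCost
            rw [beq_eq_false_iff_ne.mpr hm]
            simp
          rw [eD_succ', hcost] at hrec
          have htri : eD xs ys i' (j' + 1) + 1 ≤ d + 1 ∨ eD xs ys (i' + 1) j' + 1 ≤ d + 1 ∨
              eD xs ys i' j' + 1 ≤ d + 1 := by omega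
          rcases htri with hA | hB | hC
          · -- vertical predecessor (i', j) on diagonal k+1
            have hok' : okN xs ys d (k + 1) i' := by
              refine ⟨by omega, by omega, by omega, ?_⟩
              rw [show (((i' : Nat) : Int) + (k + 1)).toNat = j' + 1 by omega]
              omega
            have hHH := HH_le xs ys hok'
            have hHH0 : (0 : Int) ≤ HH xs ys d (k + 1) := by omega
            have hkn : k < (ys.length : Int) := by omega
            have hge := cand_ge2 xs ys d k hk2 hkn hHH0
            refine ⟨by omega, le_trans ?_ (edSlide_ge xs ys k _ _)⟩
            omega
          · -- horizontal predecessor (i, j') on diagonal k-1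
            have hok' : okN xs ys d (k - 1) (i' + 1) := by
              refine ⟨by omega, by omega, by omega, ?_⟩
              rw [show (((i' + 1 : Nat) : Int) + (k - 1)).toNat = j' by omega]
              omega
            have hHH := HH_le xs ys hok'
            have hHH0 : (0 : Int) ≤ HH xs ys d (k - 1) := by omega
            have hkm : -(xs.length : Int) < k := by omega
            have hge := cand_ge3 xs ys d k hk2 hkm hHH0
            refine ⟨by omega, le_trans ?_ (edSlide_ge xs ys k _ _)⟩
            omega
          · -- diagonal predecessor (i', j') on diagonal k
            have hok' : okN xs ys d k i' := by
              refine ⟨by omega, by omega, by omega, ?_⟩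
              rw [show (((i' : Nat) : Int) + k).toNat = j' by omega]
              omega
            have hHH := HH_le xs ys hok'
            have hHH0 : (0 : Int) ≤ HH xs ys d k := by omega
            have hge := cand_ge1 xs ys d k hk2 hHH0
            refine ⟨by omega, le_trans ?_ (edSlide_ge xs ys k _ _)⟩
            omega

lemma step_k (xs ys : List Char) (d k : Int) (hd : 0 ≤ d)
    (hk1 : -(xs.length : Int) ≤ k) (hk2 : k ≤ (ys.length : Int)) :
    (if 0 ≤ cand xs ys d k then edSlide xs ys k (xs.length + 1) (cand xs ys d k) else -1)
      = HH xs ys (d + 1) k := by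
  by_cases hc : 0 ≤ cand xs ys d k
  · rw [if_pos hc]
    have hsnd := cand_sound xs ys d k hk1 hk2 hc
    obtain ⟨hs0, hsok⟩ := edSlide_ok xs ys (d + 1) k (xs.length + 1) (cand xs ys d k) hc hsnd
    apply le_antisymm
    · have := HH_le xs ys hsok
      omega
    · have hH0 : 0 ≤ HH xs ys (d + 1) k := by
        have := HH_le xs ys hsok
        omega
      obtain ⟨i0, hi0, hok0⟩ := HH_mem xs ys hH0
      have := (cand_complete xs ys d k hd hk1 hk2 i0 hok0).2
      omega
  · rw [if_neg hc]
    rcases HH_neg_or xs ys (d + 1) k with h | h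
    · omega
    · exfalso
      obtain ⟨i0, hi0, hok0⟩ := HH_mem xs ys h
      exact hc (cand_complete xs ys d k hd hk1 hk2 i0 hok0).1

lemma init_k (xs ys : List Char) (k : Int)
    (hk1 : -(xs.length : Int) ≤ k) (hk2 : k ≤ (ys.length : Int)) :
    (if 0 ≤ k then edSlide xs ys k (xs.length + 1) 0 else -1) = HH xs ys 0 k := by
  by_cases hk0 : 0 ≤ k
  · rw [if_pos hk0]
    have hok0 : okN xs ys 0 k ((0 : Int).toNat) := by
      refine ⟨by omega, by omega, by omega, ?_⟩
      simp [eD_zero]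
    obtain ⟨hs0, hsok⟩ := edSlide_ok xs ys 0 k (xs.length + 1) 0 (by omega) hok0
    apply le_antisymm
    · have := HH_le xs ys hsok; omega
    · have hH0 : 0 ≤ HH xs ys 0 k := by have := HH_le xs ys hsok; omega
      obtain ⟨i0, hi0, hok⟩ := HH_mem xs ys hH0
      set s := edSlide xs ys k (xs.length + 1) 0 with hsdef
      have key : ∀ i : Nat, okN xs ys 0 k i → (i : Int) ≤ s := by
        intro i
        induction i using Nat.strong_induction_on with
        | _ i IH =>
          intro hok
          obtain ⟨o1, o2, o3, o4⟩ := hok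
          by_cases hi0' : i = 0
          · subst hi0'; omega
          · have hjpos : 1 ≤ (i : Int) + k := by omega
            obtain ⟨i', rfl⟩ : ∃ i', i = i' + 1 := ⟨i - 1, by omega⟩
            set j : Nat := (((i' + 1 : Nat) : Int) + k).toNat with hjdef
            obtain ⟨j', hj'⟩ : ∃ j', j = j' + 1 := ⟨j - 1, by omega⟩
            have hrec : eD xs ys (i' + 1) (j' + 1) ≤ 0 := by rw [← hj']; exact o4
            by_cases hm : xs.getD i' ' ' = ys.getD j' ' '
            · have heq := eD_matchEq xs ys i' j' hm
              have hok' : okN xs ys 0 k i' := by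
                refine ⟨by omega, by omega, by omega, ?_⟩
                rw [show (((i' : Nat) : Int) + k).toNat = j' by omega]
                omega
              have hle := IH i' (by omega) hok'
              by_cases hlt : (i' : Int) < s
              · omega
              · exfalso
                apply edSlide_stopped xs ys k (xs.length + 1) 0 (by push_cast; omega)
                rw [← hsdef, show s = (i' : Int) by omega]
                refine ⟨by omega, by omega, ?_⟩
                rw [show (((i' : Nat) : Int) + k) = (((j' : Nat) : Nat) : Int) by omega,
                  PySem.List.pyGetD_natCast, PySem.List.pyGetD_natCast]
                exact hm
            · exfalso
              have hcost : eCost xs ys i' j' = 1 := by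
                unfold eCost
                rw [beq_eq_false_iff_ne.mpr hm]
                simp
              rw [eD_succ', hcost] at hrec
              have n1 := eD_nonneg xs ys i' (j' + 1)
              have n2 := eD_nonneg xs ys (i' + 1) j'
              have n3 := eD_nonneg xs ys i' j'
              omega
      have := key i0 hok
      omega
  · rw [if_neg hk0]
    rcases HH_neg_or xs ys 0 k with h | h
    · omega
    · exfalso
      obtain ⟨i0, hi0, hok⟩ := HH_mem xs ys h
      obtain ⟨o1, o2, o3, o4⟩ := hok
      have := eD_ge_sub xs ys i0 (((i0 : Nat) : Int) + k).toNat
      omega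

-- reading a mapped diagonal table at index k + m
lemma getF (xs ys : List Char) (g : Int → Int) (k : Int)
    (hk1 : -(xs.length : Int) ≤ k) (hk2 : k ≤ (ys.length : Int)) :
    PySem.List.pyGetD
      (((PySem.List.pyRange (-(xs.length : Int)) ((ys.length : Int) + 1) 1)).map g)
      (k + (xs.length : Int)) 0 = g k := by
  have hK : k + (xs.length : Int) = (((k + (xs.length : Int)).toNat : Nat) : Int) := by omega
  rw [hK, PySem.List.pyGetD_natCast, PySem.List.pyRange_one, List.map_map,
    PySem.List.getD_map_range _ _ _ _ (by omega)]
  simp only [Function.comp_apply]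
  congr 1
  omega

lemma nest_flat (m n k a b c : Int) (hm : 0 ≤ m) (hnk : 0 ≤ n - k) :
    (if -m < k ∧ 0 ≤ c then
        max (if k < n ∧ 0 ≤ b then
            max (if 0 ≤ a then min (min (a + 1) m) (n - k) else -1) (min (b + 1) m)
          else (if 0 ≤ a then min (min (a + 1) m) (n - k) else -1))
          (min c (n - k))
      else (if k < n ∧ 0 ≤ b then
            max (if 0 ≤ a then min (min (a + 1) m) (n - k) else -1) (min (b + 1) m)
          else (if 0 ≤ a then min (min (a + 1) m) (n - k) else -1)))
    = max (max (if 0 ≤ a then min (min (a + 1) m) (n - k) else -1)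
               (if k < n ∧ 0 ≤ b then min (b + 1) m else -1))
          (if -m < k ∧ 0 ≤ c then min c (n - k) else -1) := by
  split_ifs <;> omega

lemma step_k_flat (xs ys : List Char) (d k : Int) (hd : 0 ≤ d)
    (hk1 : -(xs.length : Int) ≤ k) (hk2 : k ≤ (ys.length : Int)) :
    (if 0 ≤ candFlat xs ys d k then
      edSlide xs ys k (xs.length + 1) (candFlat xs ys d k) else -1)
      = HH xs ys (d + 1) k := by
  rw [← cand_eq_flat xs ys d k hk2]
  exact step_k xs ys d k hd hk1 hk2

lemma step_map (xs ys : List Char) (d : Int) (hd : 0 ≤ d) :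
    edStep xs ys ((PySem.List.pyRange (-(xs.length : Int)) ((ys.length : Int) + 1) 1).map
        (HH xs ys d))
      = (PySem.List.pyRange (-(xs.length : Int)) ((ys.length : Int) + 1) 1).map
        (HH xs ys (d + 1)) := by
  unfold edStep
  apply List.map_congr_left
  intro k hk
  rw [PySem.List.mem_pyRange_one] at hk
  have hk1 : -(xs.length : Int) ≤ k := hk.1
  have hk2 : k ≤ (ys.length : Int) := by omega
  dsimp only
  rw [getF xs ys (HH xs ys d) k hk1 hk2]
  rw [nest_flat ((xs.length : Int)) ((ys.length : Int)) k (HH xs ys d k)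
      (PySem.List.pyGetD
        ((PySem.List.pyRange (-(xs.length : Int)) ((ys.length : Int) + 1) 1).map (HH xs ys d))
        (k + 1 + (xs.length : Int)) 0)
      (PySem.List.pyGetD
        ((PySem.List.pyRange (-(xs.length : Int)) ((ys.length : Int) + 1) 1).map (HH xs ys d))
        (k - 1 + (xs.length : Int)) 0)
      (by positivity) (by omega)]
  have hbeq : (if k < (ys.length : Int) ∧
        0 ≤ PySem.List.pyGetD
          ((PySem.List.pyRange (-(xs.length : Int)) ((ys.length : Int) + 1) 1).map (HH xs ys d))
          (k + 1 + (xs.length : Int)) 0 then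
        min (PySem.List.pyGetD
          ((PySem.List.pyRange (-(xs.length : Int)) ((ys.length : Int) + 1) 1).map (HH xs ys d))
          (k + 1 + (xs.length : Int)) 0 + 1) (xs.length : Int) else -1)
      = (if k < (ys.length : Int) ∧ 0 ≤ HH xs ys d (k + 1) then
        min (HH xs ys d (k + 1) + 1) (xs.length : Int) else -1) := by
    by_cases hb : k < (ys.length : Int)
    · rw [show k + 1 + (xs.length : Int) = (k + 1) + (xs.length : Int) by ring,
        getF xs ys (HH xs ys d) (k + 1) (by omega) (by omega)]
    · rw [if_neg (fun h => hb h.1), if_neg (fun h => hb h.1)]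
  have hceq : (if -(xs.length : Int) < k ∧
        0 ≤ PySem.List.pyGetD
          ((PySem.List.pyRange (-(xs.length : Int)) ((ys.length : Int) + 1) 1).map (HH xs ys d))
          (k - 1 + (xs.length : Int)) 0 then
        min (PySem.List.pyGetD
          ((PySem.List.pyRange (-(xs.length : Int)) ((ys.length : Int) + 1) 1).map (HH xs ys d))
          (k - 1 + (xs.length : Int)) 0) ((ys.length : Int) - k) else -1)
      = (if -(xs.length : Int) < k ∧ 0 ≤ HH xs ys d (k - 1) then
        min (HH xs ys d (k - 1)) ((ys.length : Int) - k) else -1) := by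
    by_cases hc : -(xs.length : Int) < k
    · rw [show k - 1 + (xs.length : Int) = (k - 1) + (xs.length : Int) by ring,
        getF xs ys (HH xs ys d) (k - 1) (by omega) (by omega)]
    · rw [if_neg (fun h => hc h.1), if_neg (fun h => hc h.1)]
  rw [hbeq, hceq]
  have hfold : max (max
      (if 0 ≤ HH xs ys d k then
        min (min (HH xs ys d k + 1) (xs.length : Int)) ((ys.length : Int) - k) else -1)
      (if k < (ys.length : Int) ∧ 0 ≤ HH xs ys d (k + 1) then
        min (HH xs ys d (k + 1) + 1) (xs.length : Int) else -1))
      (if -(xs.length : Int) < k ∧ 0 ≤ HH xs ys d (k - 1) then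
        min (HH xs ys d (k - 1)) ((ys.length : Int) - k) else -1)
      = candFlat xs ys d k := by
    simp only [candFlat]
  rw [hfold]
  exact step_k_flat xs ys d k hd hk1 hk2

lemma guard_iff (xs ys : List Char) (d : Int) :
    (((PySem.List.pyRange (-(xs.length : Int)) ((ys.length : Int) + 1) 1).map
        (HH xs ys d)).all (fun f => decide (f < (xs.length : Int))) = true)
      ↔ ∀ t : Nat, t ≤ ys.length → d + 1 ≤ eD xs ys xs.length t := by
  rw [List.all_eq_true]
  constructor
  · intro hall t ht
    by_contra hcon
    push_neg at hcon
    have hok : okN xs ys d ((t : Int) - (xs.length : Int)) xs.length := by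
      refine ⟨by omega, by omega, by omega, ?_⟩
      rw [show ((xs.length : Int) + ((t : Int) - (xs.length : Int))).toNat = t by omega]
      omega
    have hHH := HH_le xs ys hok
    have hmem : ((t : Int) - (xs.length : Int)) ∈
        PySem.List.pyRange (-(xs.length : Int)) ((ys.length : Int) + 1) 1 := by
      rw [PySem.List.mem_pyRange_one]; omega
    have hval := hall (HH xs ys d ((t : Int) - (xs.length : Int)))
      (List.mem_map.mpr ⟨((t : Int) - (xs.length : Int)), hmem, rfl⟩)
    simp only [decide_eq_true_eq] at hval
    omega
  · intro hlow f hf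
    obtain ⟨k, hkmem, rfl⟩ := List.mem_map.mp hf
    rw [PySem.List.mem_pyRange_one] at hkmem
    simp only [decide_eq_true_eq]
    have hle := HH_le_cap xs ys d k
    rcases lt_or_eq_of_le hle with h | h
    · exact h
    · exfalso
      have h0 : 0 ≤ HH xs ys d k := by omega
      obtain ⟨i0, hi0, hok⟩ := HH_mem xs ys h0
      have hi0' : i0 = xs.length := by omega
      subst hi0'
      obtain ⟨o1, o2, o3, o4⟩ := hok
      have := hlow (((xs.length : Int) + k).toNat) (by omega)
      omega

lemma loop_spec (xs ys : List Char) :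
    ∀ (fuel : Nat) (d : Int), 0 ≤ d →
      (∀ t : Nat, t ≤ ys.length → d ≤ eD xs ys xs.length t) →
      ((xs.length : Int) < d + (fuel : Int)) →
      ∃ t : Nat, t ≤ ys.length ∧
        edLoop xs ys fuel
          ((PySem.List.pyRange (-(xs.length : Int)) ((ys.length : Int) + 1) 1).map (HH xs ys d)) d
          = eD xs ys xs.length t ∧
        ∀ u : Nat, u ≤ ys.length →
          edLoop xs ys fuel
            ((PySem.List.pyRange (-(xs.length : Int)) ((ys.length : Int) + 1) 1).map (HH xs ys d)) d
            ≤ eD xs ys xs.length u := by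
  intro fuel
  induction fuel with
  | zero =>
    intro d hd hlow hfuel
    exfalso
    have := hlow 0 (by omega)
    rw [eD_i_zero] at this
    push_cast at hfuel
    omega
  | succ fuel ih =>
    intro d hd hlow hfuel
    simp only [edLoop]
    by_cases hg : (((PySem.List.pyRange (-(xs.length : Int)) ((ys.length : Int) + 1) 1).map
        (HH xs ys d)).all (fun f => decide (f < (xs.length : Int))) = true)
    · rw [if_pos hg, step_map xs ys d hd]
      exact ih (d + 1) (by omega) ((guard_iff xs ys d).mp hg) (by push_cast at hfuel ⊢; omega)
    · rw [if_neg hg]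
      have : ¬ ∀ t : Nat, t ≤ ys.length → d + 1 ≤ eD xs ys xs.length t :=
        fun h => hg ((guard_iff xs ys d).mpr h)
      push_neg at this
      obtain ⟨t, ht, hlt⟩ := this
      have heq : eD xs ys xs.length t = d := le_antisymm (by omega) (hlow t ht)
      exact ⟨t, ht, heq.symm, fun u hu => heq ▸ by
        have := hlow u hu
        omega⟩

lemma alt_spec (x y : String) :
    ∃ t : Nat, t ≤ y.toList.length ∧
      editDistance_approximate_matching_alt x y = eD x.toList y.toList x.toList.length t ∧
      ∀ u : Nat, u ≤ y.toList.length →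
        editDistance_approximate_matching_alt x y ≤ eD x.toList y.toList x.toList.length u := by
  have hF : (PySem.List.pyRange (-(x.toList.length : Int)) ((y.toList.length : Int) + 1) 1).map
        (fun k => if 0 ≤ k then edSlide x.toList y.toList k (x.toList.length + 1) 0 else -1)
      = (PySem.List.pyRange (-(x.toList.length : Int)) ((y.toList.length : Int) + 1) 1).map
        (HH x.toList y.toList 0) := by
    apply List.map_congr_left
    intro k hk
    rw [PySem.List.mem_pyRange_one] at hk
    exact init_k x.toList y.toList k hk.1 (by omega)
  have h := loop_spec x.toList y.toList (x.toList.length + 2) 0 (by omega)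
      (fun t ht => eD_nonneg x.toList y.toList x.toList.length t) (by push_cast; omega)
  simpa only [editDistance_approximate_matching_alt, hF] using h

-- ===== VERDICT (by name: the statement is the Claim_ definition above) =====
theorem editDistance_approximate_matching_spec : Claim_equal_editDistance_approximate_matching := by
  intro x y _
  unfold Spec_editDistance_approximate_matching
  have hA : editDistance_approximate_matching x y
      = PySem.List.pyGetD
          (PySem.List.sorted (doneRow x.toList y.toList x.toList.length) (fun v => v) false) 0 0 := by
    simp only [editDistance_approximate_matching]
    rw [buildA, initA, zeroA, matA_zero, outerA x.toList y.toList x.toList.length (le_refl _),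
      lastRowA]
  obtain ⟨t0, ht0, hBeq, hBle⟩ := alt_spec x y
  rw [hA]
  cases hs : PySem.List.sorted (doneRow x.toList y.toList x.toList.length) (fun v => v) false with
  | nil =>
    exfalso
    rw [PySem.List.sorted_eq_nil_iff] at hs
    have hlen : (doneRow x.toList y.toList x.toList.length).length = y.toList.length + 1 := by
      simp [doneRow]
    rw [hs] at hlen
    simp at hlen
  | cons hd tl =>
    rw [PySem.List.pyGetD_zero_cons]
    have hmem : hd ∈ doneRow x.toList y.toList x.toList.length := by
      have : hd ∈ PySem.List.sorted (doneRow x.toList y.toList x.toList.length) (fun v => v) false := by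
        rw [hs]; exact List.mem_cons_self
      exact (PySem.List.mem_sorted _ _ _ _).mp this
    have hle : ∀ v ∈ doneRow x.toList y.toList x.toList.length, hd ≤ v :=
      PySem.List.key_head_sorted_le _ _ hs
    have hbmem : editDistance_approximate_matching_alt x y
        ∈ doneRow x.toList y.toList x.toList.length := by
      rw [hBeq]
      unfold doneRow
      exact List.mem_map.mpr ⟨t0, List.mem_range.mpr (by omega), rfl⟩
    have hble' : ∀ v ∈ doneRow x.toList y.toList x.toList.length,
        editDistance_approximate_matching_alt x y ≤ v := by
      intro v hv
      unfold doneRow at hv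
      obtain ⟨t, ht, rfl⟩ := List.mem_map.mp hv
      exact hBle t (by simp only [List.mem_range] at ht; omega)
    exact pv_min_mem hmem hle hbmem hble'
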